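-- pv_equiv track=rewrite | github.com/LuciusLan/wl-coref | coref/coref_model.py | insert_subwords
-- ===== SOURCE A (Python) =====
-- def insert_subwords(subword_mask, input_seq):
--     output = []
--     input_seq_iter = iter(input_seq)
--     prev_ = next(input_seq_iter)
--     for i, sw in enumerate(subword_mask):
--         if sw == 1:
--             try:
--                 prev_ = next(input_seq_iter)
--             except StopIteration:
--                 prev_ = input_seq[-1]
--         output.append(prev_)
--     return output
-- ===== SOURCE B (Python) =====
-- def insert_subwords(subword_mask, input_seq):
--     counts = []
--     c = 0
--     for sw in subword_mask:
--         if sw == 1: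
--             c += 1
--         counts.append(c)
--     last = len(input_seq) - 1
--     return [input_seq[min(k, last)] for k in counts]
-- ===== Notes on version B (the rewrite author's own statement) =====
-- stated objective: alternative
-- what changed: replaces the iterator with try/except StopIteration clamping by two passes: a prefix count of mask==1 positions, then a min-clamped index into input_seq
import Mathlib
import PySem

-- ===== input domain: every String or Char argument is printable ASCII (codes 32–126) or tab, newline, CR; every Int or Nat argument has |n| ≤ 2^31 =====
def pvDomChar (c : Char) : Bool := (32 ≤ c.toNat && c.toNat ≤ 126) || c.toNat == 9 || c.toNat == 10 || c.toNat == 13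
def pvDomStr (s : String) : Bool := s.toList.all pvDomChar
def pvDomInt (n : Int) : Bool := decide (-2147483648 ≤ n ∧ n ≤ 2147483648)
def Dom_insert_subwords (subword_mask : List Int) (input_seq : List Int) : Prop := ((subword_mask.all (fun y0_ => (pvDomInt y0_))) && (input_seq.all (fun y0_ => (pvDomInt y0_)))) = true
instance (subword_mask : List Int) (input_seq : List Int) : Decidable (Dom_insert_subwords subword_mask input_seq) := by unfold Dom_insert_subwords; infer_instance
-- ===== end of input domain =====

-- B replaces A's iterator + try/except StopIteration clamping by two passes: a prefix count
-- of mask==1 positions, then a min-clamped index into input_seq (objective: alternative).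

-- ===== PORT A =====
-- iterator state: pos = next index to yield; prev = last yielded value.
def insertA (input : List Int) : List Int → Nat → Int → List Int
  | [], _, _ => []
  | sw :: rest, pos, prev =>
    if sw = 1 then
      match input[pos]? with
      | some v => v :: insertA input rest (pos + 1) v
      | none =>
        -- StopIteration branch: prev_ = input_seq[-1]
        let p := (PySem.List.pyGet? input (-1)).getD 0
        p :: insertA input rest pos p
    else prev :: insertA input rest pos prev

def insert_subwords (subword_mask : List Int) (input_seq : List Int) : List Int :=
  match input_seq with
  | [] => []  -- Python raises StopIteration here; excluded by Pre_
  | h :: _ => insertA input_seq subword_mask 1 h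

-- ===== PORT B =====
-- first pass: inclusive prefix counts of mask elements equal to 1
def countsB : List Int → Int → List Int
  | [], _ => []
  | sw :: rest, c =>
    (if sw = 1 then c + 1 else c) :: countsB rest (if sw = 1 then c + 1 else c)

def insert_subwords_alt (subword_mask : List Int) (input_seq : List Int) : List Int :=
  let last : Int := (input_seq.length : Int) - 1
  (countsB subword_mask 0).map
    (fun k => (PySem.List.pyGet? input_seq (min k last)).getD 0)

-- ===== PRECONDITION & SPEC =====
-- Pre_ excludes empty input_seq, on which Python A raises StopIteration.
def Pre_insert_subwords (subword_mask : List Int) (input_seq : List Int) : Prop :=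
  input_seq ≠ []
instance (subword_mask : List Int) (input_seq : List Int) : Decidable (Pre_insert_subwords subword_mask input_seq) := by unfold Pre_insert_subwords; infer_instance

def pvWitness_insert_subwords : List Int × List Int := ([1, 0, 1, 1, 0], [10, 20, 30])

def Spec_insert_subwords (subword_mask : List Int) (input_seq : List Int) (out : List Int) : Prop := out = insert_subwords_alt subword_mask input_seq
instance (subword_mask : List Int) (input_seq : List Int) (out : List Int) : Decidable (Spec_insert_subwords subword_mask input_seq out) := by unfold Spec_insert_subwords; infer_instance

-- ===== CLAIM (what is proved, stated in full; the proofs are below) =====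
def Claim_equal_insert_subwords : Prop := ∀ (subword_mask : List Int) (input_seq : List Int), Dom_insert_subwords subword_mask input_seq → Pre_insert_subwords subword_mask input_seq → Spec_insert_subwords subword_mask input_seq (insert_subwords subword_mask input_seq)

-- ===== LEMMAS AND PROOFS =====

-- the value A's prev holds after c ones have been consumed, = B's element for count c
def pvP (input : List Int) (k : Int) : Int :=
  (PySem.List.pyGet? input (min k ((input.length : Int) - 1))).getD 0

lemma pvP_of_lt (input : List Int) (c : Nat) (h : c < input.length) :
    pvP input (c : Int) = input[c] := by
  unfold pvP
  have hmin : min (c : Int) ((input.length : Int) - 1) = (c : Int) := by omega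
  rw [hmin, PySem.List.pyGet?_natCast, List.getElem?_eq_getElem h, Option.getD_some]

lemma pvP_of_ge (input : List Int) (c : Nat) (h0 : 0 < input.length)
    (h : input.length ≤ c) :
    pvP input (c : Int) = input[input.length - 1]'(by omega) := by
  unfold pvP
  have hmin : min (c : Int) ((input.length : Int) - 1) = ((input.length - 1 : Nat) : Int) := by
    omega
  rw [hmin, PySem.List.pyGet?_natCast,
    List.getElem?_eq_getElem (by omega), Option.getD_some]

lemma insertA_eq_map (input : List Int) (h0 : 0 < input.length) :
    ∀ (mask : List Int) (c : Nat),
      insertA input mask (min (c + 1) input.length) (pvP input (c : Int))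
        = (countsB mask (c : Int)).map
            (fun k => (PySem.List.pyGet? input (min k ((input.length : Int) - 1))).getD 0)
  | [], c => rfl
  | sw :: rest, c => by
    have hc1 : ((c : Int) + 1) = ((c + 1 : Nat) : Int) := by push_cast; ring
    by_cases hsw : sw = 1
    · simp only [insertA, countsB, if_pos hsw, List.map_cons, hc1]
      by_cases hlt : c + 1 < input.length
      · rw [show min (c + 1) input.length = c + 1 from by omega,
            List.getElem?_eq_getElem hlt, ← pvP_of_lt input (c + 1) hlt]
        dsimp only
        have hrec := insertA_eq_map input h0 rest (c + 1)
        rw [show min (c + 1 + 1) input.length = c + 1 + 1 from by omega] at hrec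
        rw [hrec]
        simp only [pvP]
      · rw [show min (c + 1) input.length = input.length from by omega,
            List.getElem?_eq_none (by omega)]
        dsimp only
        have hlast : (PySem.List.pyGet? input (-1)).getD 0 = pvP input ((c + 1 : Nat) : Int) := by
          rw [pvP_of_ge input (c + 1) h0 (by omega), PySem.List.pyGet?_neg_one,
              List.getLast?_eq_getElem?, List.getElem?_eq_getElem (by omega),
              Option.getD_some]
        have hrec := insertA_eq_map input h0 rest (c + 1)
        rw [show min (c + 1 + 1) input.length = input.length from by omega] at hrec
        rw [hlast, hrec]
        simp only [pvP]
    · simp only [insertA, countsB, if_neg hsw, List.map_cons]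
      rw [insertA_eq_map input h0 rest c]
      simp only [pvP]

-- ===== VERDICT (by name: the statement is the Claim_ definition above) =====
theorem insert_subwords_spec : Claim_equal_insert_subwords := by
  intro mask input _ hpre
  unfold Spec_insert_subwords insert_subwords insert_subwords_alt
  cases input with
  | nil => exact absurd rfl hpre
  | cons h t =>
    have h0 : 0 < (h :: t).length := by simp
    have key := insertA_eq_map (h :: t) h0 mask 0
    rw [show min (0 + 1) (h :: t).length = 1 from by simp,
        pvP_of_lt (h :: t) 0 (by simp)] at key
    exact key
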